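-- pv_equiv track=rewrite | github.com/adobe-mdsr/adobe-mdsr.github.io | update_publication_dates.py | update_front_matter
-- ===== SOURCE A (Python) =====
-- def update_front_matter(front_matter, new_date, new_tags=None):
--     """Update front matter with new date values and tags if provided."""
--     updated_lines = []
--     date_updated = False
--     publish_date_updated = False
--     tags_updated = False
--
--     in_tags_section = False
--
--     for line in front_matter.strip().split('\n'):
--         if line.startswith('date:'):
--             updated_lines.append(f'date: "{new_date}"')
--             date_updated = True
--         elif line.startswith('publishDate:'):
--             updated_lines.append(f'publishDate: "{new_date}"')
--             publish_date_updated = True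
--         elif line.startswith('tags:'):
--             if new_tags:
--                 updated_lines.append('tags:')
--                 for tag in new_tags:
--                     updated_lines.append(f'- {tag}')
--                 tags_updated = True
--                 in_tags_section = True
--             else:
--                 updated_lines.append(line)
--                 in_tags_section = True
--         elif in_tags_section and line.startswith('- '):
--             if not new_tags:  # Only add existing tags if we're not replacing them
--                 updated_lines.append(line)
--         elif in_tags_section and not line.startswith('- '):
--             in_tags_section = False
--             updated_lines.append(line)
--         else:
--             updated_lines.append(line)
--
--     # Add date fields if they don't exist
--     if not date_updated:
--         updated_lines.append(f'date: "{new_date}"')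
--     if not publish_date_updated:
--         updated_lines.append(f'publishDate: "{new_date}"')
--
--     # Add tags if they don't exist and we have new ones
--     if not tags_updated and new_tags:
--         updated_lines.append('tags:')
--         for tag in new_tags:
--             updated_lines.append(f'- {tag}')
--
--     return '\n'.join(updated_lines)
-- ===== SOURCE B (Python) =====
-- def update_front_matter(front_matter, new_date, new_tags=None):
--     """Update front matter with new date values and tags if provided.
--
--     Index-based pass without state flags: when a tags: line is replaced, the
--     contiguous '- ' item lines directly under it are consumed on the spot;
--     the missing-field trailers are decided by any() scans over the input lines.
--     """
--     lines = front_matter.strip().split('\n')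
--     date_line = f'date: "{new_date}"'
--     publish_line = f'publishDate: "{new_date}"'
--     out = []
--     i = 0
--     n = len(lines)
--     while i < n:
--         line = lines[i]
--         i += 1
--         if line.startswith('date:'):
--             out.append(date_line)
--         elif line.startswith('publishDate:'):
--             out.append(publish_line)
--         elif line.startswith('tags:'):
--             if new_tags:
--                 out.append('tags:')
--                 out.extend(f'- {tag}' for tag in new_tags)
--                 while i < n and lines[i].startswith('- '):
--                     i += 1
--             else:
--                 out.append(line)
--         else:
--             out.append(line)
--     if not any(l.startswith('date:') for l in lines):
--         out.append(date_line)
--     if not any(l.startswith('publishDate:') for l in lines):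
--         out.append(publish_line)
--     if new_tags and not any(l.startswith('tags:') for l in lines):
--         out.append('tags:')
--         out.extend(f'- {tag}' for tag in new_tags)
--     return '\n'.join(out)
-- ===== Notes on version B (the rewrite author's own statement) =====
-- stated objective: simpler
-- what changed: Replaces A's four mutable flags and tags-section state machine by a flag-free index pass: a replaced tags: line consumes its contiguous '- ' item lines on the spot, and the missing-field trailers are decided by any() scans over the input lines.
-- intended difference: When new_tags is non-empty and a '- ' list item follows the tags: block only across intervening date:/publishDate: lines, A's leftover in_tags_section flag silently drops that item, while B removes only the contiguous '- ' lines directly under tags: and keeps the later item, which is the intended YAML-block behaviour. — e.g. on update_front_matter("tags:\n- a\ndate: x\n- b", "D", some ["t"]): A returns "tags:\n- t\ndate: \"D\"\npublishDate: \"D\"", B returns "tags:\n- t\ndate: \"D\"\n- b\npublishDate: \"D\""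
import Mathlib
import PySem

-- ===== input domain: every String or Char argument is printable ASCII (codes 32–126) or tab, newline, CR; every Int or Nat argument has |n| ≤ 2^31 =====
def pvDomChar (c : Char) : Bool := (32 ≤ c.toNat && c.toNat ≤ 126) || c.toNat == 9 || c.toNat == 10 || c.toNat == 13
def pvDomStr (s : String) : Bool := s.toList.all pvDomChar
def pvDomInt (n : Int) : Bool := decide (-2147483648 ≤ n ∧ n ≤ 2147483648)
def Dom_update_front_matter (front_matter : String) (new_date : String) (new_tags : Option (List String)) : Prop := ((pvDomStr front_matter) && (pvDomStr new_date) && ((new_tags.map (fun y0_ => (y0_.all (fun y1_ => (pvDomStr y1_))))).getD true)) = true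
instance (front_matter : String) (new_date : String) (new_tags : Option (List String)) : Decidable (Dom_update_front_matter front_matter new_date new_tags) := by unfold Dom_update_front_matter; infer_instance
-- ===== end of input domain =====

-- B drops A's four state flags: an index pass that consumes the contiguous '- ' lines right
-- under a replaced tags: line, with any() scans deciding the missing-field trailers; on the
-- exceptional inputs of D_ below B keeps list items A's leftover flag silently drops.

-- truthiness of the Python value `new_tags` (None or a list); shared by both ports
def pvTruthy (nt : Option (List String)) : Bool :=
  match nt with
  | none => false
  | some l => !l.isEmpty

-- ===== PORT A =====

-- one iteration of A's for-loop; state = (updated_lines, date_updated, publish_date_updated, tags_updated, in_tags_section)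
def uA_step (new_date : String) (new_tags : Option (List String))
    (st : List String × Bool × Bool × Bool × Bool) (line : String) :
    List String × Bool × Bool × Bool × Bool :=
  let (ul, d, p, t, itag) := st
  if PySem.Str.startswith line "date:" then
    (ul ++ ["date: \"" ++ new_date ++ "\""], true, p, t, itag)
  else if PySem.Str.startswith line "publishDate:" then
    (ul ++ ["publishDate: \"" ++ new_date ++ "\""], d, true, t, itag)
  else if PySem.Str.startswith line "tags:" then
    if pvTruthy new_tags then
      (ul ++ ["tags:"] ++ (new_tags.getD []).map (fun tag => "- " ++ tag), d, p, true, true)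
    else
      (ul ++ [line], d, p, t, true)
  else if itag && PySem.Str.startswith line "- " then
    (if !pvTruthy new_tags then ul ++ [line] else ul, d, p, t, itag)
  else if itag && !PySem.Str.startswith line "- " then
    (ul ++ [line], d, p, t, false)
  else
    (ul ++ [line], d, p, t, itag)

def update_front_matter (front_matter : String) (new_date : String) (new_tags : Option (List String)) : String :=
  let lines := (PySem.Str.split? (PySem.Str.strip front_matter) "\n").getD []  -- sep "\n" is nonempty: split? is always some
  let (ul, d, p, t, _) := lines.foldl (uA_step new_date new_tags) ([], false, false, false, false)
  let ul := if !d then ul ++ ["date: \"" ++ new_date ++ "\""] else ul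
  let ul := if !p then ul ++ ["publishDate: \"" ++ new_date ++ "\""] else ul
  let ul := if !t && pvTruthy new_tags then
      ul ++ ["tags:"] ++ (new_tags.getD []).map (fun tag => "- " ++ tag)
    else ul
  PySem.Str.join "\n" ul

-- ===== PORT B =====

-- the four line classifiers Source B tests with str.startswith
def uDash (l : String) : Bool := PySem.Str.startswith l "- "
def uDt (l : String) : Bool := PySem.Str.startswith l "date:"
def uPb (l : String) : Bool := PySem.Str.startswith l "publishDate:"
def uTg (l : String) : Bool := PySem.Str.startswith l "tags:"

-- Source B's inner `while i < n and lines[i].startswith('- '): i += 1` on the remaining lines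
def uB_consume : List String → List String
  | [] => []
  | l :: ls => if uDash l then uB_consume ls else l :: ls

theorem uB_consume_len : ∀ ls : List String, (uB_consume ls).length ≤ ls.length
  | [] => Nat.le_refl _
  | l :: ls => by
    unfold uB_consume
    split
    · exact Nat.le_succ_of_le (uB_consume_len ls)
    · exact Nat.le_refl _

-- Source B's main while-loop over the remaining lines, accumulating `out`
def uB_go (truthy : Bool) (dateL pubL : String) (tagLines : List String)
    (out : List String) : List String → List String
  | [] => out
  | line :: rest =>
    if uDt line then uB_go truthy dateL pubL tagLines (out ++ [dateL]) rest
    else if uPb line then uB_go truthy dateL pubL tagLines (out ++ [pubL]) rest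
    else if uTg line then
      if truthy then uB_go truthy dateL pubL tagLines (out ++ tagLines) (uB_consume rest)
      else uB_go truthy dateL pubL tagLines (out ++ [line]) rest
    else uB_go truthy dateL pubL tagLines (out ++ [line]) rest
termination_by l => l.length
decreasing_by
  · exact Nat.lt_succ_self _
  · exact Nat.lt_succ_self _
  · exact Nat.lt_succ_of_le (uB_consume_len rest)
  · exact Nat.lt_succ_self _
  · exact Nat.lt_succ_self _

def update_front_matter_alt (front_matter : String) (new_date : String) (new_tags : Option (List String)) : String :=
  let lines := (PySem.Str.split? (PySem.Str.strip front_matter) "\n").getD []  -- sep "\n" is nonempty: split? is always some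
  let dateL := "date: \"" ++ new_date ++ "\""
  let pubL := "publishDate: \"" ++ new_date ++ "\""
  let tagLines := "tags:" :: (new_tags.getD []).map (fun tag => "- " ++ tag)
  let out := uB_go (pvTruthy new_tags) dateL pubL tagLines [] lines
  let out := if !(lines.any uDt) then out ++ [dateL] else out
  let out := if !(lines.any uPb) then out ++ [pubL] else out
  let out := if pvTruthy new_tags && !(lines.any uTg) then out ++ tagLines else out
  PySem.Str.join "\n" out

-- ===== PRECONDITION & SPEC =====

-- When new_tags is non-empty and a '- ' list item follows the tags: block only across
-- intervening date:/publishDate: lines, A's leftover in_tags_section flag silently drops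
-- that item; B removes only the contiguous '- ' lines directly under tags: and keeps the
-- later item, the intended YAML-block behaviour.
-- D_ holds iff new_tags is truthy and the lines of the stripped front matter contain, at
-- positions i < j < k: a `tags:` line (i), a '- ' line (k), a date:/publishDate: line (j),
-- with every line strictly between i and k a '- '/date:/publishDate: line.
def D_update_front_matter (front_matter : String) (new_date : String) (new_tags : Option (List String)) : Prop :=
  new_tags.getD [] ≠ [] ∧
    (let L := (PySem.Str.split? (PySem.Str.strip front_matter) "\n").getD []
     ∃ k, k < L.length ∧ PySem.Str.startswith (L.getD k "") "- " = true ∧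
       ∃ i, i < k ∧ PySem.Str.startswith (L.getD i "") "tags:" = true ∧
         (∀ m, m < k → i < m →
           (PySem.Str.startswith (L.getD m "") "- " || PySem.Str.startswith (L.getD m "") "date:" ||
             PySem.Str.startswith (L.getD m "") "publishDate:") = true) ∧
         ∃ j, j < k ∧ i < j ∧
           (PySem.Str.startswith (L.getD j "") "date:" || PySem.Str.startswith (L.getD j "") "publishDate:") = true)

instance (front_matter : String) (new_date : String) (new_tags : Option (List String)) : Decidable (D_update_front_matter front_matter new_date new_tags) := by unfold D_update_front_matter; infer_instance

def Spec_update_front_matter (front_matter : String) (new_date : String) (new_tags : Option (List String)) (out : String) : Prop := ¬ D_update_front_matter front_matter new_date new_tags → out = update_front_matter_alt front_matter new_date new_tags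
instance (front_matter : String) (new_date : String) (new_tags : Option (List String)) (out : String) : Decidable (Spec_update_front_matter front_matter new_date new_tags out) := by unfold Spec_update_front_matter; infer_instance

def pvDiffWitness_update_front_matter : String × String × Option (List String) :=
  ("tags:\n- a\ndate: x\n- b", "D", some ["t"])
def pvDiffWitnessOut_update_front_matter : String × String :=
  ("tags:\n- t\ndate: \"D\"\npublishDate: \"D\"",
   "tags:\n- t\ndate: \"D\"\n- b\npublishDate: \"D\"")

-- ===== CLAIM (what is proved, stated in full; the proofs are below) =====
def Claim_unchanged_update_front_matter : Prop := ∀ (front_matter : String) (new_date : String) (new_tags : Option (List String)), Dom_update_front_matter front_matter new_date new_tags → Spec_update_front_matter front_matter new_date new_tags (update_front_matter front_matter new_date new_tags)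
def Claim_changed_update_front_matter : Prop := Dom_update_front_matter (pvDiffWitness_update_front_matter.1) (pvDiffWitness_update_front_matter.2.1) (pvDiffWitness_update_front_matter.2.2) ∧ D_update_front_matter (pvDiffWitness_update_front_matter.1) (pvDiffWitness_update_front_matter.2.1) (pvDiffWitness_update_front_matter.2.2) ∧ update_front_matter (pvDiffWitness_update_front_matter.1) (pvDiffWitness_update_front_matter.2.1) (pvDiffWitness_update_front_matter.2.2) = pvDiffWitnessOut_update_front_matter.1 ∧ update_front_matter_alt (pvDiffWitness_update_front_matter.1) (pvDiffWitness_update_front_matter.2.1) (pvDiffWitness_update_front_matter.2.2) = pvDiffWitnessOut_update_front_matter.2 ∧ pvDiffWitnessOut_update_front_matter.1 ≠ pvDiffWitnessOut_update_front_matter.2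
def Claim_exact_update_front_matter : Prop := ∀ (front_matter : String) (new_date : String) (new_tags : Option (List String)), Dom_update_front_matter front_matter new_date new_tags → D_update_front_matter front_matter new_date new_tags → update_front_matter front_matter new_date new_tags ≠ update_front_matter_alt front_matter new_date new_tags

-- ===== LEMMAS AND PROOFS =====

-- proof-side 3-state scan equivalent to D_'s pattern: state 1 after a `tags:` line,
-- state 2 once a date:/publishDate: line occurs in the following run; true iff a '- '
-- line is hit in state 2
def uDScan (s : Nat) : List String → Bool
  | [] => false
  | l :: ls =>
    if uTg l then uDScan 1 ls
    else if uDash l then (if s == 2 then true else uDScan s ls)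
    else if uDt l || uPb l then uDScan (if s == 0 then 0 else 2) ls
    else uDScan 0 ls

-- the pattern of D_ and its two partial forms, phrased over a line list
def uRun (l : String) : Bool := uDash l || uDt l || uPb l
def uDP (l : String) : Bool := uDt l || uPb l
def uQ2 (L : List String) : Prop :=
  ∃ k, k < L.length ∧ uDash (L.getD k "") = true ∧ ∀ m, m < k → uRun (L.getD m "") = true
def uQ1 (L : List String) : Prop :=
  ∃ k, k < L.length ∧ uDash (L.getD k "") = true ∧ (∀ m, m < k → uRun (L.getD m "") = true) ∧
    ∃ j, j < k ∧ uDP (L.getD j "") = true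
def uPat (L : List String) : Prop :=
  ∃ k, k < L.length ∧ uDash (L.getD k "") = true ∧
    ∃ i, i < k ∧ uTg (L.getD i "") = true ∧
      (∀ m, m < k → i < m → uRun (L.getD m "") = true) ∧
      ∃ j, j < k ∧ i < j ∧ uDP (L.getD j "") = true

theorem uPat_cons (l : String) (ls : List String) (h : uPat ls) : uPat (l :: ls) := by
  obtain ⟨k, hk, hd, i, hik, hTg, hrun, j, hjk, hij, hdp⟩ := h
  refine ⟨k+1, by simp; omega, by simpa using hd, i+1, by omega, by simpa using hTg, ?_,
    j+1, by omega, by omega, by simpa using hdp⟩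
  intro m hm him
  cases m with
  | zero => omega
  | succ m => simpa using hrun m (by omega) (by omega)

theorem uQ2_cons (l : String) (ls : List String) (hl : uRun l = true) (h : uQ2 ls) :
    uQ2 (l :: ls) := by
  obtain ⟨k, hk, hd, hrun⟩ := h
  refine ⟨k+1, by simp; omega, by simpa using hd, ?_⟩
  intro m hm
  cases m with
  | zero => simpa using hl
  | succ m => simpa using hrun m (by omega)

theorem uQ1_cons (l : String) (ls : List String) (hl : uRun l = true) (h : uQ1 ls) :
    uQ1 (l :: ls) := by
  obtain ⟨k, hk, hd, hrun, j, hjk, hdp⟩ := h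
  refine ⟨k+1, by simp; omega, by simpa using hd, ?_, j+1, by omega, by simpa using hdp⟩
  intro m hm
  cases m with
  | zero => simpa using hl
  | succ m => simpa using hrun m (by omega)

theorem uQ2_dp (l : String) (ls : List String) (hl : uDP l = true) (h : uQ2 ls) :
    uQ1 (l :: ls) := by
  obtain ⟨k, hk, hd, hrun⟩ := h
  refine ⟨k+1, by simp; omega, by simpa using hd, ?_, 0, by omega, by simpa using hl⟩
  intro m hm
  cases m with
  | zero => simp [uRun, uDP] at hl ⊢; tauto
  | succ m => simpa using hrun m (by omega)

theorem uQ1_tags (l : String) (ls : List String) (hl : uTg l = true) (h : uQ1 ls) :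
    uPat (l :: ls) := by
  obtain ⟨k, hk, hd, hrun, j, hjk, hdp⟩ := h
  refine ⟨k+1, by simp; omega, by simpa using hd, 0, by omega, by simpa using hl, ?_,
    j+1, by omega, by omega, by simpa using hdp⟩
  intro m hm him
  cases m with
  | zero => omega
  | succ m => simpa using hrun m (by omega)

theorem uDScan_cons (s : Nat) (l : String) (ls : List String) :
    uDScan s (l :: ls) =
      if uTg l then uDScan 1 ls
      else if uDash l then (if s == 2 then true else uDScan s ls)
      else if uDt l || uPb l then uDScan (if s == 0 then 0 else 2) ls
      else uDScan 0 ls := rfl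

-- soundness of the scan: acceptance yields the pattern (relative to the start state)
set_option maxHeartbeats 1000000 in
theorem uScan_sound : ∀ L : List String,
    (uDScan 2 L = true → uQ2 L ∨ uPat L) ∧
    (uDScan 1 L = true → uQ1 L ∨ uPat L) ∧
    (uDScan 0 L = true → uPat L)
  | [] => by simp [uDScan]
  | l :: ls => by
    obtain ⟨ih2, ih1, ih0⟩ := uScan_sound ls
    by_cases h3 : uTg l
    · have key : uDScan 1 ls = true → uPat (l :: ls) := fun h =>
        (ih1 h).elim (uQ1_tags l ls h3) (uPat_cons l ls)
      refine ⟨fun h => ?_, fun h => ?_, fun h => ?_⟩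
      · exact Or.inr (key (by simpa [uDScan_cons, h3] using h))
      · exact Or.inr (key (by simpa [uDScan_cons, h3] using h))
      · exact key (by simpa [uDScan_cons, h3] using h)
    · by_cases h4 : uDash l
      · have hrl : uRun l = true := by simp [uRun, h4]
        refine ⟨fun _ => ?_, fun h => ?_, fun h => ?_⟩
        · exact Or.inl ⟨0, by simp, by simpa using h4, fun m hm => absurd hm (by omega)⟩
        · rw [uDScan_cons] at h; simp [h3, h4] at h
          exact (ih1 h).elim (fun hq => Or.inl (uQ1_cons l ls hrl hq)) (fun hp => Or.inr (uPat_cons l ls hp))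
        · rw [uDScan_cons] at h; simp [h3, h4] at h
          exact uPat_cons l ls (ih0 h)
      · by_cases h12 : uDt l || uPb l
        · have hrl : uRun l = true := by
            simp only [uRun]
            simp only [Bool.or_eq_true] at h12 ⊢
            tauto
          have hdpl : uDP l = true := h12
          refine ⟨fun h => ?_, fun h => ?_, fun h => ?_⟩
          · rw [uDScan_cons] at h; simp [h3, h4, h12] at h
            exact (ih2 h).elim (fun hq => Or.inl (uQ2_cons l ls hrl hq)) (fun hp => Or.inr (uPat_cons l ls hp))
          · rw [uDScan_cons] at h; simp [h3, h4, h12] at h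
            exact (ih2 h).elim (fun hq => Or.inl (uQ2_dp l ls hdpl hq)) (fun hp => Or.inr (uPat_cons l ls hp))
          · rw [uDScan_cons] at h; simp [h3, h4, h12] at h
            exact uPat_cons l ls (ih0 h)
        · refine ⟨fun h => ?_, fun h => ?_, fun h => ?_⟩
          · exact Or.inr (uPat_cons l ls (ih0 (by simpa [uDScan_cons, h3, h4, h12] using h)))
          · exact Or.inr (uPat_cons l ls (ih0 (by simpa [uDScan_cons, h3, h4, h12] using h)))
          · exact uPat_cons l ls (ih0 (by simpa [uDScan_cons, h3, h4, h12] using h))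

-- two prefixes of the same string cannot start with different characters
theorem uStarts_disj (l : List Char) (c₁ c₂ : Char) (p q : List Char) (hne : c₁ ≠ c₂)
    (h : PySem.Chars.startswith l (c₁ :: p) = true) :
    PySem.Chars.startswith l (c₂ :: q) = false := by
  rw [PySem.Chars.startswith_iff] at h
  by_contra hne2
  rw [Bool.not_eq_false, PySem.Chars.startswith_iff] at hne2
  obtain ⟨u, hu⟩ := h; obtain ⟨v, hv⟩ := hne2
  rw [← hu] at hv
  simp at hv
  exact hne hv.1.symm

-- Python truthiness of new_tags, as a condition on the input
theorem pvTruthy_iff (nt : Option (List String)) : pvTruthy nt = true ↔ nt.getD [] ≠ [] := by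
  cases nt <;> simp [pvTruthy]

-- a '- ' line matches none of the three key prefixes
theorem uDash_not (l : String) (h : uDash l = true) :
    uDt l = false ∧ uPb l = false ∧ uTg l = false := by
  simp [uDash, PySem.Str.startswith] at h
  refine ⟨?_, ?_, ?_⟩ <;> simp [uDt, uPb, uTg, PySem.Str.startswith] <;>
    exact uStarts_disj _ _ _ _ _ (by decide) h

-- a 'date:' line matches none of the other key prefixes
theorem uDt_not (l : String) (h : uDt l = true) :
    uPb l = false ∧ uTg l = false ∧ uDash l = false := by
  simp [uDt, PySem.Str.startswith] at h
  refine ⟨?_, ?_, ?_⟩ <;> simp [uPb, uTg, uDash, PySem.Str.startswith] <;>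
    exact uStarts_disj _ _ _ _ _ (by decide) h

-- a 'publishDate:' line matches neither 'tags:' nor '- '
theorem uPb_not (l : String) (h : uPb l = true) :
    uTg l = false ∧ uDash l = false := by
  simp [uPb, PySem.Str.startswith] at h
  refine ⟨?_, ?_⟩ <;> simp [uTg, uDash, PySem.Str.startswith] <;>
    exact uStarts_disj _ _ _ _ _ (by decide) h

-- uA_step on each class of line, phrased with the u-classifiers
theorem uA_step_dt (nd : String) (nt : Option (List String)) (out : List String)
    (d p t flag : Bool) (line : String) (h1 : uDt line = true) :
    uA_step nd nt (out, d, p, t, flag) line = (out ++ ["date: \"" ++ nd ++ "\""], true, p, t, flag) := by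
  simp [uDt] at h1; simp [uA_step, h1]

theorem uA_step_pb (nd : String) (nt : Option (List String)) (out : List String)
    (d p t flag : Bool) (line : String) (h1 : uDt line = false) (h2 : uPb line = true) :
    uA_step nd nt (out, d, p, t, flag) line = (out ++ ["publishDate: \"" ++ nd ++ "\""], d, true, t, flag) := by
  simp [uDt, uPb] at h1 h2; simp [uA_step, h1, h2]

theorem uA_step_tg (nd : String) (nt : Option (List String)) (out : List String)
    (d p t flag : Bool) (line : String) (h1 : uDt line = false) (h2 : uPb line = false)
    (h3 : uTg line = true) (ht : pvTruthy nt = true) :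
    uA_step nd nt (out, d, p, t, flag) line =
      (out ++ "tags:" :: (nt.getD []).map (fun tag => "- " ++ tag), d, p, true, true) := by
  simp [uDt, uPb, uTg] at h1 h2 h3; simp [uA_step, h1, h2, h3, ht]

theorem uA_step_tg_nt (nd : String) (nt : Option (List String)) (out : List String)
    (d p t flag : Bool) (line : String) (h1 : uDt line = false) (h2 : uPb line = false)
    (h3 : uTg line = true) (ht : pvTruthy nt = false) :
    uA_step nd nt (out, d, p, t, flag) line = (out ++ [line], d, p, t, true) := by
  simp [uDt, uPb, uTg] at h1 h2 h3; simp [uA_step, h1, h2, h3, ht]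

theorem uA_step_dash_drop (nd : String) (nt : Option (List String)) (out : List String)
    (d p t : Bool) (line : String) (h4 : uDash line = true) (ht : pvTruthy nt = true) :
    uA_step nd nt (out, d, p, t, true) line = (out, d, p, t, true) := by
  obtain ⟨h1, h2, h3⟩ := uDash_not line h4
  simp [uDt, uPb, uTg, uDash] at h1 h2 h3 h4
  simp [uA_step, h1, h2, h3, h4, ht]

theorem uA_step_dash_keep (nd : String) (nt : Option (List String)) (out : List String)
    (d p t flag : Bool) (line : String) (h4 : uDash line = true) (ht : pvTruthy nt = false) :
    uA_step nd nt (out, d, p, t, flag) line = (out ++ [line], d, p, t, flag) := by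
  obtain ⟨h1, h2, h3⟩ := uDash_not line h4
  simp [uDt, uPb, uTg, uDash] at h1 h2 h3 h4
  cases flag <;> simp [uA_step, h1, h2, h3, h4, ht]

theorem uA_step_dash_clear (nd : String) (nt : Option (List String)) (out : List String)
    (d p t : Bool) (line : String) (h4 : uDash line = true) :
    uA_step nd nt (out, d, p, t, false) line = (out ++ [line], d, p, t, false) := by
  obtain ⟨h1, h2, h3⟩ := uDash_not line h4
  simp [uDt, uPb, uTg, uDash] at h1 h2 h3 h4
  simp [uA_step, h1, h2, h3, h4]

theorem uA_step_other (nd : String) (nt : Option (List String)) (out : List String)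
    (d p t flag : Bool) (line : String) (h1 : uDt line = false) (h2 : uPb line = false)
    (h3 : uTg line = false) (h4 : uDash line = false) :
    uA_step nd nt (out, d, p, t, flag) line = (out ++ [line], d, p, t, false) := by
  simp [uDt, uPb, uTg, uDash] at h1 h2 h3 h4
  cases flag <;> simp [uA_step, h1, h2, h3, h4]

-- dash lines do not affect the any() scans for the three key prefixes
theorem uAny_consume (f : String → Bool) (hf : ∀ l, uDash l = true → f l = false) :
    ∀ ls : List String, (uB_consume ls).any f = ls.any f
  | [] => rfl
  | l :: ls => by
    unfold uB_consume
    by_cases h : uDash l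
    · simp [h, hf l h, uAny_consume f hf ls]
    · simp [h]

-- A's fold with the flag set just drops a leading '- ' run (when new_tags is truthy)
theorem uA_skip (nd : String) (nt : Option (List String)) (ht : pvTruthy nt = true) :
    ∀ (ls : List String) (out : List String) (d p t : Bool),
      ls.foldl (uA_step nd nt) (out, d, p, t, true) =
        (uB_consume ls).foldl (uA_step nd nt) (out, d, p, t, true)
  | [], _, _, _, _ => rfl
  | l :: ls, out, d, p, t => by
    unfold uB_consume
    by_cases h : uDash l
    · rw [List.foldl_cons, uA_step_dash_drop nd nt out d p t l h ht, if_pos h]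
      exact uA_skip nd nt ht ls out d p t
    · rw [if_neg h]

-- consuming the leading '- ' run: the scan from state 1 equals state 2 on the remainder
theorem uDScan_consume_eq : ∀ ls : List String, uDScan 2 (uB_consume ls) = uDScan 1 ls
  | [] => rfl
  | l :: ls => by
    unfold uB_consume
    by_cases hd : uDash l
    · obtain ⟨h1, h2, h3⟩ := uDash_not l hd
      rw [if_pos hd, uDScan_consume_eq ls, uDScan_cons]
      simp [h1, h2, h3, hd]
    · rw [if_neg hd, uDScan_cons, uDScan_cons]
      by_cases h3 : uTg l
      · simp [h3]
      · by_cases h12 : uDt l || uPb l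
        · simp [h3, hd, h12]
        · simp [h3, hd, h12]

-- monotonicity of the scan in its start state (0 ≤ 1 ≤ 2)
theorem uScan_mono : ∀ L : List String,
    (uDScan 0 L = true → uDScan 1 L = true) ∧ (uDScan 1 L = true → uDScan 2 L = true)
  | [] => by simp [uDScan]
  | l :: ls => by
    obtain ⟨m01, m12⟩ := uScan_mono ls
    by_cases h3 : uTg l
    · constructor <;> intro h <;> simpa [uDScan_cons, h3] using h
    · by_cases h4 : uDash l
      · constructor
        · intro h; rw [uDScan_cons] at h ⊢; simp [h3, h4] at h ⊢; exact m01 h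
        · intro h; rw [uDScan_cons]; simp [h3, h4]
      · by_cases h12 : uDt l || uPb l
        · constructor
          · intro h; rw [uDScan_cons] at h ⊢; simp [h3, h4, h12] at h ⊢; exact m12 (m01 h)
          · intro h; rw [uDScan_cons] at h ⊢; simpa [h3, h4, h12] using h
        · constructor <;> intro h <;>
            (rw [uDScan_cons] at h ⊢; simpa [h3, h4, h12] using h)

-- a date:/publishDate: line is neither tags: nor '- '
theorem uDP_not (l : String) (h : uDP l = true) : uTg l = false ∧ uDash l = false := by
  have h0 : uDt l = true ∨ uPb l = true := by
    have := h; simp only [uDP, Bool.or_eq_true] at this; exact this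
  rcases h0 with h' | h'
  · exact ⟨(uDt_not l h').2.1, (uDt_not l h').2.2⟩
  · exact ⟨(uPb_not l h').1, (uPb_not l h').2⟩

-- completeness of the scan: the pattern (relative to the start state) forces acceptance
set_option maxHeartbeats 1000000 in
theorem uScan_complete : ∀ L : List String,
    (uQ2 L → uDScan 2 L = true) ∧ (uQ1 L → uDScan 1 L = true) ∧ (uPat L → uDScan 0 L = true)
  | [] => by
    refine ⟨?_, ?_, ?_⟩ <;> rintro ⟨k, hk, -⟩ <;> simp at hk
  | l :: ls => by
    obtain ⟨c2, c1, c0⟩ := uScan_complete ls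
    refine ⟨?_, ?_, ?_⟩
    · rintro ⟨k, hk, hd, hrun⟩
      cases k with
      | zero =>
        have h4 : uDash l = true := by simpa using hd
        have h3 := (uDash_not l h4).2.2
        rw [uDScan_cons]; simp [h3, h4]
      | succ k =>
        have hrl : uRun l = true := by simpa using hrun 0 (by omega)
        have hq : uQ2 ls := ⟨k, by simpa using hk, by simpa using hd,
          fun m hm => by simpa using hrun (m+1) (by omega)⟩
        by_cases h4 : uDash l
        · have h3 := (uDash_not l h4).2.2
          rw [uDScan_cons]; simp [h3, h4]
        · have h12 : (uDt l || uPb l) = true := by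
            simp only [uRun, Bool.or_eq_true] at hrl
            simp only [Bool.or_eq_true]
            rcases hrl with (h | h) | h
            · exact absurd h (by simpa using h4)
            · exact Or.inl h
            · exact Or.inr h
          obtain ⟨h3, -⟩ := uDP_not l h12
          rw [uDScan_cons]; simp only [h3, h4, h12]; simpa using c2 hq
    · rintro ⟨k, hk, hd, hrun, j, hjk, hdp⟩
      cases k with
      | zero => omega
      | succ k =>
        have hq2 : uQ2 ls := ⟨k, by simpa using hk, by simpa using hd,
          fun m hm => by simpa using hrun (m+1) (by omega)⟩
        cases j with
        | zero =>
          have hdpl : uDP l = true := by simpa using hdp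
          obtain ⟨h3, h4⟩ := uDP_not l hdpl
          rw [uDScan_cons]; simp only [h3, h4, show (uDt l || uPb l) = true from hdpl]
          simpa using c2 hq2
        | succ j =>
          have hq1 : uQ1 ls := ⟨k, by simpa using hk, by simpa using hd,
            fun m hm => by simpa using hrun (m+1) (by omega), j, by omega, by simpa using hdp⟩
          have hrl : uRun l = true := by simpa using hrun 0 (by omega)
          by_cases h4 : uDash l
          · have h3 := (uDash_not l h4).2.2
            rw [uDScan_cons]; simp only [h3, h4]
            simpa using c1 hq1
          · have h12 : (uDt l || uPb l) = true := by
              simp only [uRun, Bool.or_eq_true] at hrl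
              simp only [Bool.or_eq_true]
              rcases hrl with (h | h) | h
              · exact absurd h (by simpa using h4)
              · exact Or.inl h
              · exact Or.inr h
            obtain ⟨h3, -⟩ := uDP_not l h12
            rw [uDScan_cons]; simp only [h3, h4, h12]; simpa using c2 hq2
    · rintro ⟨k, hk, hd, i, hik, hTg, hrun, j, hjk, hij, hdp⟩
      cases i with
      | zero =>
        have h3 : uTg l = true := by simpa using hTg
        cases k with
        | zero => omega
        | succ k =>
        cases j with
        | zero => omega
        | succ j =>
          have hq1 : uQ1 ls := ⟨k, by simpa using hk, by simpa using hd,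
            fun m hm => by simpa using hrun (m+1) (by omega) (by omega),
            j, by omega, by simpa using hdp⟩
          rw [uDScan_cons]; simp only [h3, if_pos]
          · exact c1 hq1
      | succ i =>
        cases k with
        | zero => omega
        | succ k =>
        cases j with
        | zero => omega
        | succ j =>
          have hp : uPat ls := ⟨k, by simpa using hk, by simpa using hd,
            i, by omega, by simpa using hTg,
            fun m hm him => by simpa using hrun (m+1) (by omega) (by omega),
            j, by omega, by omega, by simpa using hdp⟩
          have h0 : uDScan 0 ls = true := c0 hp
          by_cases h3 : uTg l
          · rw [uDScan_cons]; simp only [h3, if_pos]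
            · exact (uScan_mono ls).1 h0
          · by_cases h4 : uDash l
            · rw [uDScan_cons]; simp only [h3, h4]; simpa using h0
            · by_cases h12 : uDt l || uPb l
              · rw [uDScan_cons]; simp only [h3, h4, h12]; simpa using h0
              · rw [uDScan_cons]; simp only [h3, h4, h12]; simpa using h0

-- total joined weight of a line list: each line's length plus one
def uW (l : List String) : Nat := (l.map (fun s => s.toList.length + 1)).sum

theorem uW_nil : uW [] = 0 := rfl

theorem uW_append (a b : List String) : uW (a ++ b) = uW a + uW b := by
  simp [uW]

theorem uW_cons (x : String) (t : List String) : uW (x :: t) = x.toList.length + 1 + uW t := by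
  simp [uW]

-- length of a newline-join of char lists
theorem uJoinLen : ∀ (t : List (List Char)) (x : List Char),
    (PySem.Chars.join ['\n'] (x :: t)).length = x.length + (t.map (fun c => c.length + 1)).sum
  | [], x => by simp [PySem.Chars.join_singleton]
  | y :: t, x => by
    rw [PySem.Chars.join_cons_cons]
    simp [uJoinLen t y]
    omega

-- a strictly lighter nonempty line list joins to a different string
theorem uJoin_ne (a b : List String) (ha : a ≠ []) (hw : uW a < uW b) :
    PySem.Str.join "\n" a ≠ PySem.Str.join "\n" b := by
  intro heq
  have hlen := congrArg (fun s => s.toList.length) heq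
  simp only [PySem.Str.toList_join] at hlen
  match a, b with
  | x :: t, y :: u =>
    have hsep : "\n".toList = ['\n'] := rfl
    rw [hsep] at hlen
    simp only [List.map_cons, uJoinLen] at hlen
    simp only [uW, List.map_cons, List.sum_cons] at hw
    have e1 : ((t.map String.toList).map (fun c => c.length + 1)).sum
        = (t.map (fun s : String => s.toList.length + 1)).sum := by
      rw [List.map_map]; rfl
    have e2 : ((u.map String.toList).map (fun c => c.length + 1)).sum
        = (u.map (fun s : String => s.toList.length + 1)).sum := by
      rw [List.map_map]; rfl
    rw [e1, e2] at hlen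
    omega
  | x :: t, [] =>
    simp [uW] at hw
  | [], _ => exact ha rfl

-- uB_go with an accumulator is the accumulator plus uB_go from empty
theorem uB_go_append (tr : Bool) (dL pL : String) (tL : List String) :
    ∀ (rest out : List String), uB_go tr dL pL tL out rest = out ++ uB_go tr dL pL tL [] rest := by
  have main : ∀ (n : Nat) (rest : List String), rest.length ≤ n → ∀ out,
      uB_go tr dL pL tL out rest = out ++ uB_go tr dL pL tL [] rest := by
    intro n
    induction n with
    | zero =>
      intro rest hlen out
      have : rest = [] := List.eq_nil_of_length_eq_zero (Nat.le_zero.mp hlen)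
      subst this; simp [uB_go]
    | succ m ih =>
      intro rest hlen out
      cases rest with
      | nil => simp [uB_go]
      | cons line rs =>
        have h' : rs.length ≤ m := Nat.le_of_succ_le_succ hlen
        by_cases h1 : uDt line
        · rw [show uB_go tr dL pL tL out (line :: rs) = uB_go tr dL pL tL (out ++ [dL]) rs from by
                simp [uB_go, h1],
              show uB_go tr dL pL tL [] (line :: rs) = uB_go tr dL pL tL ([] ++ [dL]) rs from by
                simp [uB_go, h1],
              ih rs h' (out ++ [dL]), ih rs h' ([] ++ [dL])]
          simp
        · by_cases h2 : uPb line
          · rw [show uB_go tr dL pL tL out (line :: rs) = uB_go tr dL pL tL (out ++ [pL]) rs from by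
                  simp [uB_go, h1, h2],
                show uB_go tr dL pL tL [] (line :: rs) = uB_go tr dL pL tL ([] ++ [pL]) rs from by
                  simp [uB_go, h1, h2],
                ih rs h' (out ++ [pL]), ih rs h' ([] ++ [pL])]
            simp
          · by_cases h3 : uTg line
            · by_cases htr : tr
              · subst htr
                have hc : (uB_consume rs).length ≤ m := Nat.le_trans (uB_consume_len rs) h'
                rw [show uB_go true dL pL tL out (line :: rs) = uB_go true dL pL tL (out ++ tL) (uB_consume rs) from by
                      simp [uB_go, h1, h2, h3],
                    show uB_go true dL pL tL [] (line :: rs) = uB_go true dL pL tL ([] ++ tL) (uB_consume rs) from by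
                      simp [uB_go, h1, h2, h3],
                    ih (uB_consume rs) hc (out ++ tL), ih (uB_consume rs) hc ([] ++ tL)]
                simp
              · rw [Bool.not_eq_true] at htr
                subst htr
                rw [show uB_go false dL pL tL out (line :: rs) = uB_go false dL pL tL (out ++ [line]) rs from by
                      simp [uB_go, h1, h2, h3],
                    show uB_go false dL pL tL [] (line :: rs) = uB_go false dL pL tL ([] ++ [line]) rs from by
                      simp [uB_go, h1, h2, h3],
                    ih rs h' (out ++ [line]), ih rs h' ([] ++ [line])]
                simp
            · rw [show uB_go tr dL pL tL out (line :: rs) = uB_go tr dL pL tL (out ++ [line]) rs from by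
                    simp [uB_go, h1, h2, h3],
                  show uB_go tr dL pL tL [] (line :: rs) = uB_go tr dL pL tL ([] ++ [line]) rs from by
                    simp [uB_go, h1, h2, h3],
                  ih rs h' (out ++ [line]), ih rs h' ([] ++ [line])]
              simp
  exact fun rest out => main rest.length rest (Nat.le_refl _) out

-- combined invariant (new_tags truthy): A's fold appends a line list aL that agrees with
-- B's loop when the scan rejects, never outweighs it, and is strictly lighter when the
-- scan accepts; A's flags are the any() scans
set_option maxHeartbeats 2000000 in
theorem uMainC (nd : String) (nt : Option (List String)) (ht : pvTruthy nt = true) :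
    ∀ (n : Nat) (rest : List String), rest.length ≤ n → ∀ (d p t flag : Bool),
      ∃ fl aL,
        (∀ out : List String, rest.foldl (uA_step nd nt) (out, d, p, t, flag) =
          (out ++ aL, d || rest.any uDt, p || rest.any uPb, t || rest.any uTg, fl)) ∧
        (uDScan (if flag then 2 else 0) rest = false → aL = uB_go true ("date: \"" ++ nd ++ "\"") ("publishDate: \"" ++ nd ++ "\"") ("tags:" :: (nt.getD []).map (fun tag => "- " ++ tag)) [] rest) ∧
        uW aL ≤ uW (uB_go true ("date: \"" ++ nd ++ "\"") ("publishDate: \"" ++ nd ++ "\"") ("tags:" :: (nt.getD []).map (fun tag => "- " ++ tag)) [] rest) ∧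
        (uDScan (if flag then 2 else 0) rest = true → uW aL < uW (uB_go true ("date: \"" ++ nd ++ "\"") ("publishDate: \"" ++ nd ++ "\"") ("tags:" :: (nt.getD []).map (fun tag => "- " ++ tag)) [] rest)) ∧
        (rest.any uDt = true → aL ≠ []) := by
  intro n
  induction n with
  | zero =>
    intro rest hlen d p t flag
    have : rest = [] := List.eq_nil_of_length_eq_zero (Nat.le_zero.mp hlen)
    subst this
    refine ⟨flag, [], fun out => by simp, fun _ => by simp [uB_go], by simp [uB_go], ?_, by simp⟩
    intro h; cases flag <;> simp [uDScan] at h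
  | succ m ih =>
    intro rest hlen d p t flag
    cases rest with
    | nil =>
      refine ⟨flag, [], fun out => by simp, fun _ => by simp [uB_go], by simp [uB_go], ?_, by simp⟩
      intro h; cases flag <;> simp [uDScan] at h
    | cons line rs =>
      have hlen' : rs.length ≤ m := Nat.le_of_succ_le_succ hlen
      by_cases h1 : uDt line
      · -- date: line: both emit the date line and continue in the same state
        obtain ⟨h2, h3, h4⟩ := uDt_not line h1
        obtain ⟨fl, aL, hA, hEq, hle, hlt, -⟩ := ih rs hlen' true p t flag
        have hB : uB_go true ("date: \"" ++ nd ++ "\"") ("publishDate: \"" ++ nd ++ "\"") ("tags:" :: (nt.getD []).map (fun tag => "- " ++ tag)) [] (line :: rs) = ("date: \"" ++ nd ++ "\"") :: uB_go true ("date: \"" ++ nd ++ "\"") ("publishDate: \"" ++ nd ++ "\"") ("tags:" :: (nt.getD []).map (fun tag => "- " ++ tag)) [] rs := by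
          rw [show uB_go true ("date: \"" ++ nd ++ "\"") ("publishDate: \"" ++ nd ++ "\"") ("tags:" :: (nt.getD []).map (fun tag => "- " ++ tag)) [] (line :: rs) = uB_go true ("date: \"" ++ nd ++ "\"") ("publishDate: \"" ++ nd ++ "\"") ("tags:" :: (nt.getD []).map (fun tag => "- " ++ tag)) ([] ++ [("date: \"" ++ nd ++ "\"")]) rs from by
                simp [uB_go, h1],
              uB_go_append]
          simp
        have hscan : ∀ b : Bool, uDScan (if flag then 2 else 0) (line :: rs) = b ↔
            uDScan (if flag then 2 else 0) rs = b := by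
          intro b; rw [uDScan_cons]; cases flag <;> simp [h1, h2, h3, h4]
        refine ⟨fl, ("date: \"" ++ nd ++ "\"") :: aL, ?_, ?_, ?_, ?_, fun _ => by simp⟩
        · intro out
          rw [List.foldl_cons, uA_step_dt nd nt out d p t flag line h1, hA (out ++ _)]
          simp [h1, h2, h3]
        · intro h; rw [hB, hEq ((hscan false).mp h)]
        · rw [hB, uW_cons, uW_cons]; omega
        · intro h; have := hlt ((hscan true).mp h); rw [hB, uW_cons, uW_cons]; omega
      · rw [Bool.not_eq_true] at h1
        by_cases h2 : uPb line
        · -- publishDate: line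
          obtain ⟨h3, h4⟩ := uPb_not line h2
          obtain ⟨fl, aL, hA, hEq, hle, hlt, hne⟩ := ih rs hlen' d true t flag
          have hB : uB_go true ("date: \"" ++ nd ++ "\"") ("publishDate: \"" ++ nd ++ "\"") ("tags:" :: (nt.getD []).map (fun tag => "- " ++ tag)) [] (line :: rs) = ("publishDate: \"" ++ nd ++ "\"") :: uB_go true ("date: \"" ++ nd ++ "\"") ("publishDate: \"" ++ nd ++ "\"") ("tags:" :: (nt.getD []).map (fun tag => "- " ++ tag)) [] rs := by
            rw [show uB_go true ("date: \"" ++ nd ++ "\"") ("publishDate: \"" ++ nd ++ "\"") ("tags:" :: (nt.getD []).map (fun tag => "- " ++ tag)) [] (line :: rs) = uB_go true ("date: \"" ++ nd ++ "\"") ("publishDate: \"" ++ nd ++ "\"") ("tags:" :: (nt.getD []).map (fun tag => "- " ++ tag)) ([] ++ [("publishDate: \"" ++ nd ++ "\"")]) rs from by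
                  simp [uB_go, h1, h2],
                uB_go_append]
            simp
          have hscan : ∀ b : Bool, uDScan (if flag then 2 else 0) (line :: rs) = b ↔
              uDScan (if flag then 2 else 0) rs = b := by
            intro b; rw [uDScan_cons]; cases flag <;> simp [h1, h2, h3, h4]
          refine ⟨fl, ("publishDate: \"" ++ nd ++ "\"") :: aL, ?_, ?_, ?_, ?_, ?_⟩
          · intro out
            rw [List.foldl_cons, uA_step_pb nd nt out d p t flag line h1 h2, hA (out ++ _)]
            simp [h1, h2, h3]
          · intro h; rw [hB, hEq ((hscan false).mp h)]
          · rw [hB, uW_cons, uW_cons]; omega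
          · intro h; have := hlt ((hscan true).mp h); rw [hB, uW_cons, uW_cons]; omega
          · intro _; simp
        · rw [Bool.not_eq_true] at h2
          by_cases h3 : uTg line
          · -- tags: line: A sets the flag and its fold drops the dash run; B consumes it
            have hc : (uB_consume rs).length ≤ m := Nat.le_trans (uB_consume_len rs) hlen'
            obtain ⟨fl, aL, hA, hEq, hle, hlt, hne⟩ := ih (uB_consume rs) hc d p true true
            have hB : uB_go true ("date: \"" ++ nd ++ "\"") ("publishDate: \"" ++ nd ++ "\"") ("tags:" :: (nt.getD []).map (fun tag => "- " ++ tag)) [] (line :: rs) = ("tags:" :: (nt.getD []).map (fun tag => "- " ++ tag)) ++ uB_go true ("date: \"" ++ nd ++ "\"") ("publishDate: \"" ++ nd ++ "\"") ("tags:" :: (nt.getD []).map (fun tag => "- " ++ tag)) [] (uB_consume rs) := by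
              rw [show uB_go true ("date: \"" ++ nd ++ "\"") ("publishDate: \"" ++ nd ++ "\"") ("tags:" :: (nt.getD []).map (fun tag => "- " ++ tag)) [] (line :: rs) = uB_go true ("date: \"" ++ nd ++ "\"") ("publishDate: \"" ++ nd ++ "\"") ("tags:" :: (nt.getD []).map (fun tag => "- " ++ tag)) ([] ++ ("tags:" :: (nt.getD []).map (fun tag => "- " ++ tag))) (uB_consume rs) from by
                    simp [uB_go, h1, h2, h3],
                  uB_go_append]
              simp
            have hDt := uAny_consume uDt (fun l hl => (uDash_not l hl).1) rs
            have hPb := uAny_consume uPb (fun l hl => (uDash_not l hl).2.1) rs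
            have hTg := uAny_consume uTg (fun l hl => (uDash_not l hl).2.2) rs
            have hscan : ∀ b : Bool, uDScan (if flag then 2 else 0) (line :: rs) = b ↔
                uDScan 2 (uB_consume rs) = b := by
              intro b; rw [uDScan_cons, ← uDScan_consume_eq]; cases flag <;> simp [h3]
            refine ⟨fl, ("tags:" :: (nt.getD []).map (fun tag => "- " ++ tag)) ++ aL, ?_, ?_, ?_, ?_, ?_⟩
            · intro out
              rw [List.foldl_cons, uA_step_tg nd nt out d p t flag line h1 h2 h3 ht,
                uA_skip nd nt ht, hA (out ++ _)]
              simp [h1, h2, h3, hDt, hPb, hTg]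
            · intro h; rw [hB, hEq (by simpa using (hscan false).mp h)]
            · rw [hB, uW_append, uW_append]; omega
            · intro h; have := hlt (by simpa using (hscan true).mp h)
              rw [hB, uW_append, uW_append]; omega
            · intro _; simp
          · rw [Bool.not_eq_true] at h3
            by_cases h4 : uDash line
            · cases hfl : flag with
              | false =>
                -- '- ' line with the flag clear: both keep it
                obtain ⟨fl, aL, hA, hEq, hle, hlt, hne⟩ := ih rs hlen' d p t false
                have hB : uB_go true ("date: \"" ++ nd ++ "\"") ("publishDate: \"" ++ nd ++ "\"") ("tags:" :: (nt.getD []).map (fun tag => "- " ++ tag)) [] (line :: rs) = line :: uB_go true ("date: \"" ++ nd ++ "\"") ("publishDate: \"" ++ nd ++ "\"") ("tags:" :: (nt.getD []).map (fun tag => "- " ++ tag)) [] rs := by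
                  rw [show uB_go true ("date: \"" ++ nd ++ "\"") ("publishDate: \"" ++ nd ++ "\"") ("tags:" :: (nt.getD []).map (fun tag => "- " ++ tag)) [] (line :: rs) = uB_go true ("date: \"" ++ nd ++ "\"") ("publishDate: \"" ++ nd ++ "\"") ("tags:" :: (nt.getD []).map (fun tag => "- " ++ tag)) ([] ++ [line]) rs from by
                        simp [uB_go, h1, h2, h3],
                      uB_go_append]
                  simp
                have hscan : ∀ b : Bool, uDScan 0 (line :: rs) = b ↔ uDScan 0 rs = b := by
                  intro b; rw [uDScan_cons]; simp [h3, h4]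
                refine ⟨fl, line :: aL, ?_, ?_, ?_, ?_, ?_⟩
                · intro out
                  rw [List.foldl_cons, uA_step_dash_clear nd nt out d p t line h4, hA (out ++ _)]
                  simp [h1, h2, h3]
                · intro h; rw [hB, hEq ((hscan false).mp (by simpa using h))]
                · rw [hB, uW_cons, uW_cons]; omega
                · intro h; have := hlt ((hscan true).mp (by simpa using h))
                  rw [hB, uW_cons, uW_cons]; omega
                · intro _; simp
              | true =>
                -- '- ' line with the flag set: A drops it, B keeps it — the scan accepts
                obtain ⟨fl, aL, hA, hEq, hle, hlt, hne⟩ := ih rs hlen' d p t true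
                have hB : uB_go true ("date: \"" ++ nd ++ "\"") ("publishDate: \"" ++ nd ++ "\"") ("tags:" :: (nt.getD []).map (fun tag => "- " ++ tag)) [] (line :: rs) = line :: uB_go true ("date: \"" ++ nd ++ "\"") ("publishDate: \"" ++ nd ++ "\"") ("tags:" :: (nt.getD []).map (fun tag => "- " ++ tag)) [] rs := by
                  rw [show uB_go true ("date: \"" ++ nd ++ "\"") ("publishDate: \"" ++ nd ++ "\"") ("tags:" :: (nt.getD []).map (fun tag => "- " ++ tag)) [] (line :: rs) = uB_go true ("date: \"" ++ nd ++ "\"") ("publishDate: \"" ++ nd ++ "\"") ("tags:" :: (nt.getD []).map (fun tag => "- " ++ tag)) ([] ++ [line]) rs from by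
                        simp [uB_go, h1, h2, h3],
                      uB_go_append]
                  simp
                have haccept : uDScan 2 (line :: rs) = true := by
                  rw [uDScan_cons]; simp [h3, h4]
                have h1' : uDt line = false := (uDash_not line h4).1
                have h2' : uPb line = false := (uDash_not line h4).2.1
                have h3' : uTg line = false := (uDash_not line h4).2.2
                refine ⟨fl, aL, ?_, ?_, ?_, ?_, ?_⟩
                · intro out
                  rw [List.foldl_cons, uA_step_dash_drop nd nt out d p t line h4 ht, hA out]
                  simp [h1', h2', h3']
                · intro h; rw [if_pos rfl, haccept] at h; cases h
                · rw [hB, uW_cons]; omega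
                · intro _; rw [hB, uW_cons]; omega
                · intro hany
                  exact hne (by simpa [h1'] using hany)
            · -- any other line: both keep it, A's flag clears
              obtain ⟨fl, aL, hA, hEq, hle, hlt, hne⟩ := ih rs hlen' d p t false
              have h4' : uDash line = false := by simpa using h4
              have hB : uB_go true ("date: \"" ++ nd ++ "\"") ("publishDate: \"" ++ nd ++ "\"") ("tags:" :: (nt.getD []).map (fun tag => "- " ++ tag)) [] (line :: rs) = line :: uB_go true ("date: \"" ++ nd ++ "\"") ("publishDate: \"" ++ nd ++ "\"") ("tags:" :: (nt.getD []).map (fun tag => "- " ++ tag)) [] rs := by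
                rw [show uB_go true ("date: \"" ++ nd ++ "\"") ("publishDate: \"" ++ nd ++ "\"") ("tags:" :: (nt.getD []).map (fun tag => "- " ++ tag)) [] (line :: rs) = uB_go true ("date: \"" ++ nd ++ "\"") ("publishDate: \"" ++ nd ++ "\"") ("tags:" :: (nt.getD []).map (fun tag => "- " ++ tag)) ([] ++ [line]) rs from by
                      simp [uB_go, h1, h2, h3],
                    uB_go_append]
                simp
              have hscan : ∀ b : Bool, uDScan (if flag then 2 else 0) (line :: rs) = b ↔
                  uDScan 0 rs = b := by
                intro b; rw [uDScan_cons]; cases flag <;> simp [h1, h2, h3, h4]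
              refine ⟨fl, line :: aL, ?_, ?_, ?_, ?_, fun _ => by simp⟩
              · intro out
                rw [List.foldl_cons, uA_step_other nd nt out d p t flag line h1 h2 h3 h4', hA (out ++ _)]
                simp [h1, h2, h3]
              · intro h; rw [hB, hEq ((hscan false).mp h)]
              · rw [hB, uW_cons, uW_cons]; omega
              · intro h; have := hlt ((hscan true).mp h); rw [hB, uW_cons, uW_cons]; omega

-- non-truthy new_tags: both passes append every line (dates/publishDates replaced)
theorem uMainNT (nd : String) (nt : Option (List String)) (ht : pvTruthy nt = false) :
    ∀ (rest out : List String) (d p t flag : Bool),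
      ∃ fl, rest.foldl (uA_step nd nt) (out, d, p, t, flag) =
        (uB_go false ("date: \"" ++ nd ++ "\"") ("publishDate: \"" ++ nd ++ "\"")
            ("tags:" :: (nt.getD []).map (fun tag => "- " ++ tag)) out rest,
         d || rest.any uDt, p || rest.any uPb, t, fl)
  | [], out, d, p, t, flag => ⟨flag, by simp [uB_go]⟩
  | line :: rs, out, d, p, t, flag => by
    rw [List.foldl_cons]
    by_cases h1 : uDt line
    · obtain ⟨fl, hfl⟩ := uMainNT nd nt ht rs (out ++ ["date: \"" ++ nd ++ "\""]) true p t flag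
      obtain ⟨h2, h3, h4⟩ := uDt_not line h1
      exact ⟨fl, by rw [uA_step_dt nd nt out d p t flag line h1, hfl]; simp [uB_go, h1, h2]⟩
    · rw [Bool.not_eq_true] at h1
      by_cases h2 : uPb line
      · obtain ⟨fl, hfl⟩ := uMainNT nd nt ht rs (out ++ ["publishDate: \"" ++ nd ++ "\""]) d true t flag
        exact ⟨fl, by rw [uA_step_pb nd nt out d p t flag line h1 h2, hfl]; simp [uB_go, h1, h2]⟩
      · rw [Bool.not_eq_true] at h2
        by_cases h3 : uTg line
        · obtain ⟨fl, hfl⟩ := uMainNT nd nt ht rs (out ++ [line]) d p t true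
          exact ⟨fl, by rw [uA_step_tg_nt nd nt out d p t flag line h1 h2 h3 ht, hfl]; simp [uB_go, h1, h2, h3]⟩
        · rw [Bool.not_eq_true] at h3
          by_cases h4 : uDash line
          · obtain ⟨fl, hfl⟩ := uMainNT nd nt ht rs (out ++ [line]) d p t flag
            exact ⟨fl, by rw [uA_step_dash_keep nd nt out d p t flag line h4 ht, hfl]; simp [uB_go, h1, h2, h3]⟩
          · rw [Bool.not_eq_true] at h4
            obtain ⟨fl, hfl⟩ := uMainNT nd nt ht rs (out ++ [line]) d p t false
            exact ⟨fl, by rw [uA_step_other nd nt out d p t flag line h1 h2 h3 h4, hfl]; simp [uB_go, h1, h2, h3]⟩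

theorem uApp_cons_ne_nil (a : List String) (x : String) (t : List String) : a ++ x :: t ≠ [] := by
  cases a <;> simp

-- ===== VERDICT (by name: the statements are the Claim_ definitions above) =====
theorem update_front_matter_spec : Claim_unchanged_update_front_matter := by
  intro fm nd nt _ hnd
  unfold update_front_matter update_front_matter_alt
  set L := (PySem.Str.split? (PySem.Str.strip fm) "\n").getD [] with hL
  by_cases ht : pvTruthy nt = true
  · have hscan : uDScan 0 L = false := by
      by_contra hb
      rw [Bool.not_eq_false] at hb
      exact hnd ⟨(pvTruthy_iff nt).mp ht, (uScan_sound L).2.2 hb⟩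
    obtain ⟨fl, aL, hA, hEq, -, -, -⟩ := uMainC nd nt ht L.length L (Nat.le_refl _) false false false false
    have hfold := hA []
    rw [hEq (by simpa using hscan)] at hfold
    simp only [hfold]
    simp [ht]
  · rw [Bool.not_eq_true] at ht
    obtain ⟨fl, hfl⟩ := uMainNT nd nt ht L [] false false false false
    simp only [hfl]
    simp [ht]

theorem update_front_matter_changed : Claim_changed_update_front_matter := by
  unfold Claim_changed_update_front_matter
  refine ⟨by decide, ⟨by decide, by decide⟩, by decide, ?_, by decide⟩
  simp only [pvDiffWitness_update_front_matter, pvDiffWitnessOut_update_front_matter]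
  have hsplit : (PySem.Str.split? (PySem.Str.strip "tags:\n- a\ndate: x\n- b") "\n").getD [] =
      ["tags:", "- a", "date: x", "- b"] := by decide
  have e1 : uDt "tags:" = false := by decide
  have e2 : uPb "tags:" = false := by decide
  have e3 : uTg "tags:" = true := by decide
  have e4 : uDash "- a" = true := by decide
  have e5 : uDash "date: x" = false := by decide
  have e6 : uDt "date: x" = true := by decide
  have e7 : uDt "- b" = false := by decide
  have e8 : uPb "- b" = false := by decide
  have e9 : uTg "- b" = false := by decide
  simp only [update_front_matter_alt, hsplit]
  simp [uB_go, uB_consume, e1, e2, e3, e4, e5, e6, e7, e8, e9]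
  decide

theorem update_front_matter_tight : Claim_exact_update_front_matter := by
  intro fm nd nt _ hD
  obtain ⟨hne0, hpat0⟩ := hD
  have ht : pvTruthy nt = true := (pvTruthy_iff nt).mpr hne0
  unfold update_front_matter update_front_matter_alt
  set L := (PySem.Str.split? (PySem.Str.strip fm) "\n").getD [] with hL
  have hp : uPat L := hpat0
  have hscan : uDScan 0 L = true := (uScan_complete L).2.2 hp
  obtain ⟨fl, aL, hA, -, -, hlt, hdtne⟩ := uMainC nd nt ht L.length L (Nat.le_refl _) false false false false
  have hstrict : uW aL < uW (uB_go true ("date: \"" ++ nd ++ "\"") ("publishDate: \"" ++ nd ++ "\"")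
      ("tags:" :: (nt.getD []).map (fun tag => "- " ++ tag)) [] L) := hlt (by simpa using hscan)
  have hfold := hA []
  simp only [hfold]
  simp only [ht, Bool.false_or, List.nil_append]
  by_cases hDt : L.any uDt <;> by_cases hPb : L.any uPb <;> by_cases hTgA : L.any uTg <;>
    simp [hDt, hPb, hTgA, ht]
  all_goals
    refine uJoin_ne _ _ ?_ ?_
    · first
        | exact hdtne hDt
        | exact uApp_cons_ne_nil _ _ _
    · first
        | exact hstrict
        | (simp only [uW_append, uW_cons, uW_nil]; omega)
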